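-- pv_equiv track=rewrite | github.com/jhannesreimann/Bachelorarbeit | metrics_generated.py | find_javadoc_blocks
-- ===== SOURCE A (Python) =====
-- def find_javadoc_blocks(lines):
--     blocks = []
--     in_block = False
--     current = []
--     for line in lines:
--         if not in_block and line.strip().startswith('/**'):
--             in_block = True
--             current = [line]
--             continue
--         if in_block:
--             current.append(line)
--             if '*/' in line:
--                 blocks.append(''.join(current))
--                 in_block = False
--     return blocks
-- ===== SOURCE B (Python) =====
-- def find_javadoc_blocks(lines):
--     blocks = []
--     i, n = 0, len(lines)
--     while i < n:
--         if lines[i].strip().startswith('/**'):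
--             current = [lines[i]]
--             i += 1
--             closed = False
--             while i < n:
--                 current.append(lines[i])
--                 if '*/' in lines[i]:
--                     closed = True
--                     i += 1
--                     break
--                 i += 1
--             if closed:
--                 blocks.append(''.join(current))
--         else:
--             i += 1
--     return blocks
-- ===== Notes on version B (the rewrite author's own statement) =====
-- stated objective: alternative
-- what changed: Replaced A's single-pass boolean state machine (in_block flag threaded through every line) by a two-level index loop: the outer loop skips to a '/**' opener, an inner loop consumes lines until the closing '*/', and the block is emitted only if it closed.
import Mathlib
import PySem

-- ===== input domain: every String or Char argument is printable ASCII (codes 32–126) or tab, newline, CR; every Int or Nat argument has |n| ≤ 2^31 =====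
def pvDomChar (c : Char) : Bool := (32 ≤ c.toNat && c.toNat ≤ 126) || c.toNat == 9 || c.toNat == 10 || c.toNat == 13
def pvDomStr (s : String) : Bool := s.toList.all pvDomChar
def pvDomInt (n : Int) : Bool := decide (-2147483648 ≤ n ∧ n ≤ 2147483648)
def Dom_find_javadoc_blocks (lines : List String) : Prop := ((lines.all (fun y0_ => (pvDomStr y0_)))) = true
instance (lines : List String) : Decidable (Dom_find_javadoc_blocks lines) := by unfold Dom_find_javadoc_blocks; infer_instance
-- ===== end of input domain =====

-- B replaces A's boolean in_block state machine by a two-level scan (outer: find opener; inner: consume until '*/'); same return value, an alternative decomposition.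

-- ===== PORT A =====
-- A's single loop, threading state (blocks, in_block, current) over the lines.
def jdLoopA : List String → List String → Bool → List String → List String
  | [], blocks, _, _ => blocks
  | l :: rest, blocks, inb, cur =>
    if !inb && PySem.Str.startswith (PySem.Str.strip l) "/**" then
      jdLoopA rest blocks true [l]
    else if inb then
      let cur2 := cur ++ [l]
      if PySem.Str.isIn "*/" l then
        jdLoopA rest (blocks ++ [PySem.Str.join "" cur2]) false cur2
      else
        jdLoopA rest blocks true cur2
    else
      jdLoopA rest blocks inb cur

def find_javadoc_blocks (lines : List String) : List String :=
  jdLoopA lines [] false []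

-- ===== PORT B =====
-- B's inner while loop: consume lines into current until one contains '*/';
-- returns (closed, current, remaining lines).
def jdInner : List String → List String → Bool × List String × List String
  | [], cur => (false, cur, [])
  | l :: rest, cur =>
    let cur2 := cur ++ [l]
    if PySem.Str.isIn "*/" l then (true, cur2, rest) else jdInner rest cur2

-- cited by jdOuter's decreasing_by (termination of the outer loop)
theorem jdInner_len (ls cur : List String) : (jdInner ls cur).2.2.length ≤ ls.length := by
  induction ls generalizing cur with
  | nil => simp [jdInner]
  | cons l rest ih =>
    simp only [jdInner]
    split
    · simp
    · exact le_trans (ih _) (Nat.le_succ _)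

-- B's outer loop: skip until an opener, run the inner loop, emit the block only if closed.
def jdOuter (lines : List String) : List String :=
  match lines with
  | [] => []
  | l :: rest =>
    if PySem.Str.startswith (PySem.Str.strip l) "/**" then
      let r := jdInner rest [l]
      (if r.1 then [PySem.Str.join "" r.2.1] else []) ++ jdOuter r.2.2
    else jdOuter rest
termination_by lines.length
decreasing_by
  · have := jdInner_len rest [l]; simp; omega
  · simp

def find_javadoc_blocks_alt (lines : List String) : List String :=
  jdOuter lines

-- ===== PRECONDITION & SPEC =====
def Spec_find_javadoc_blocks (lines : List String) (out : List String) : Prop := out = find_javadoc_blocks_alt lines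
instance (lines : List String) (out : List String) : Decidable (Spec_find_javadoc_blocks lines out) := by unfold Spec_find_javadoc_blocks; infer_instance

-- ===== CLAIM (what is proved, stated in full; the proofs are below) =====
def Claim_equal_find_javadoc_blocks : Prop := ∀ (lines : List String), Dom_find_javadoc_blocks lines → Spec_find_javadoc_blocks lines (find_javadoc_blocks lines)

-- ===== LEMMAS AND PROOFS =====

-- Main invariant, by strong induction on the number of lines:
-- when not in a block, A's loop produces blocks ++ B's outer scan of the rest;
-- when inside a block with accumulated text cur, A's loop produces blocks ++ the result
-- of B's inner loop on cur followed by B's outer scan of what the inner loop left.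
theorem jd_key : ∀ (n : ℕ) (lines : List String), lines.length ≤ n →
    (∀ blocks cur, jdLoopA lines blocks false cur = blocks ++ jdOuter lines) ∧
    (∀ blocks cur, jdLoopA lines blocks true cur =
      blocks ++ ((if (jdInner lines cur).1 then [PySem.Str.join "" (jdInner lines cur).2.1] else [])
                  ++ jdOuter (jdInner lines cur).2.2)) := by
  intro n
  induction n with
  | zero =>
    intro lines h
    have : lines = [] := List.eq_nil_of_length_eq_zero (Nat.le_zero.mp h)
    subst this
    constructor <;> intro blocks cur <;> simp [jdLoopA, jdOuter, jdInner]
  | succ n ih =>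
    intro lines h
    cases lines with
    | nil => constructor <;> intro blocks cur <;> simp [jdLoopA, jdOuter, jdInner]
    | cons l rest =>
      have hr : rest.length ≤ n := by simp at h; omega
      constructor
      · intro blocks cur
        by_cases hop : PySem.Str.startswith (PySem.Str.strip l) "/**" = true
        · rw [jdOuter]
          simp only [jdLoopA, hop, Bool.not_false, Bool.true_and, if_true]
          exact (ih rest hr).2 blocks [l]
        · rw [jdOuter]
          simp only [jdLoopA, hop, Bool.not_false, Bool.true_and,
            if_false, Bool.false_eq_true]
          exact (ih rest hr).1 blocks cur
      · intro blocks cur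
        simp only [jdLoopA, Bool.not_true, Bool.false_and, Bool.false_eq_true, if_false,
          if_true, jdInner]
        by_cases hcl : PySem.Str.isIn "*/" l = true
        · simp only [hcl, if_pos]
          rw [(ih rest hr).1]
          simp
        · simp only [hcl, Bool.false_eq_true, if_false]
          exact (ih rest hr).2 blocks (cur ++ [l])

-- ===== VERDICT (by name: the statement is the Claim_ definition above) =====
theorem find_javadoc_blocks_spec : Claim_equal_find_javadoc_blocks := by
  intro lines _
  unfold Spec_find_javadoc_blocks find_javadoc_blocks find_javadoc_blocks_alt
  simpa using (jd_key lines.length lines le_rfl).1 [] []
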